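-- pv_equiv track=rewrite | github.com/gineer01/programming-challenges | python/HackerRank/WorldCodesprint9/weighted_string.py | cal_weights
-- ===== SOURCE A (Python) =====
-- def cal_weights(s):
--     def weight(s):
--         return ord(s) - ord('a') + 1
--
--
--     weights = set()
--     l = len(s)
--
--     i = 0
--     j = i + 1
--     weights.add(weight(s[i]))
--     while j < l:
--         if s[j] != s[i]:
--             i = j
--             j = i + 1
--             weights.add(weight(s[i]))
--             continue
--         else:
--             weights.add(weight(s[i]) * (j - i + 1))
--             j += 1
--
--     return weights
-- ===== SOURCE B (Python) =====
-- def cal_weights(s):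
--     # Two-phase: run-length-encode the string, then one set comprehension.
--     runs = []
--     for c in s:
--         if runs and runs[-1][0] == c:
--             runs[-1][1] += 1
--         else:
--             runs.append([c, 1])
--     return {(ord(c) - ord('a') + 1) * m for c, k in runs for m in range(1, k + 1)}
-- ===== Notes on version B (the rewrite author's own statement) =====
-- stated objective: simpler
-- what changed: Replaced A's two-index while loop with manual run-start tracking by a two-phase decomposition: run-length-encode the string, then emit all prefix weights of each run in a single set comprehension.
-- crash fix: On the empty string A raises IndexError at s[0]; B returns the empty set. — e.g. on cal_weights(""): A raises IndexError, B returns []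
import Mathlib
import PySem

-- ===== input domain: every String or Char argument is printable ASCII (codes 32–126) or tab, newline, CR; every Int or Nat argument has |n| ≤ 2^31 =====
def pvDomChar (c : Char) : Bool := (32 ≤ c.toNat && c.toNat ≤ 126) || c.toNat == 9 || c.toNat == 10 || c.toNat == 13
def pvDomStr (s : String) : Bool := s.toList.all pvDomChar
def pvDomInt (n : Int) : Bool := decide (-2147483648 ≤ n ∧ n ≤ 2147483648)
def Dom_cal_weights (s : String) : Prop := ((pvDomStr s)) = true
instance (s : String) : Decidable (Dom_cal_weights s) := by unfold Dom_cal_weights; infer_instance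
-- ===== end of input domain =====

-- B replaces A's two-index while loop by a run-length encoding followed by one set
-- comprehension (simpler decomposition, same cost); equivalence is about the returned set.

-- ===== PORT A =====
-- weight(s) = ord(s) - ord('a') + 1
def pyWeight (c : Char) : Int := (c.toNat : Int) - ('a'.toNat : Int) + 1

-- the while loop of A: state (i, j, weights), scanning while j < l
def calAloop (cs : List Char) (i j : Nat) (w : PySem.Set Int) : PySem.Set Int :=
  if _h : j < cs.length then
    if cs.getD j ' ' != cs.getD i ' ' then
      calAloop cs j (j + 1) (w.add (pyWeight (cs.getD j ' ')))
    else
      calAloop cs i (j + 1) (w.add (pyWeight (cs.getD i ' ') * ((j : Int) - (i : Int) + 1)))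
  else w
termination_by cs.length - j

def cal_weights (s : String) : List Int :=
  let cs := s.toList
  -- weights.add(weight(s[0])); Pre_ excludes '' where Python raises IndexError here
  calAloop cs 0 1 (PySem.Set.add PySem.Set.empty (pyWeight (cs.getD 0 ' ')))

-- ===== PORT B =====
-- one step of B's run-building loop: 'if runs and runs[-1][0] == c: runs[-1][1] += 1 else: runs.append([c, 1])'
def rleStep (runs : List (Char × Int)) (c : Char) : List (Char × Int) :=
  match runs.getLast? with
  | some (c', k) => if c' == c then runs.dropLast ++ [(c', k + 1)] else runs ++ [(c, 1)]
  | none => runs ++ [(c, 1)]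

def cal_weights_alt (s : String) : List Int :=
  let runs := s.toList.foldl rleStep []
  -- {(ord(c)-ord('a')+1) * m for c, k in runs for m in range(1, k+1)}
  runs.foldl (fun w ck =>
    (PySem.List.pyRange 1 (ck.2 + 1) 1).foldl (fun w m => PySem.Set.add w (pyWeight ck.1 * m)) w)
    PySem.Set.empty

-- ===== PRECONDITION & SPEC =====
-- Pre_ excludes exactly the empty string, on which A raises IndexError at s[0]
def Pre_cal_weights (s : String) : Prop := s ≠ ""
instance (s : String) : Decidable (Pre_cal_weights s) := by unfold Pre_cal_weights; infer_instance
def pvWitness_cal_weights : String := "aab"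

-- On the empty string A raises IndexError while B returns the empty set.
def Raises_cal_weights (s : String) : Prop := s = ""
instance (s : String) : Decidable (Raises_cal_weights s) := by unfold Raises_cal_weights; infer_instance
def pvRaiseWitness_cal_weights : String := ""
def pvRaiseWitnessOut_cal_weights : List Int := []

def Spec_cal_weights (s : String) (out : List Int) : Prop := out = cal_weights_alt s
instance (s : String) (out : List Int) : Decidable (Spec_cal_weights s out) := by unfold Spec_cal_weights; infer_instance

-- ===== CLAIM (what is proved, stated in full; the proofs are below) =====
def Claim_equal_cal_weights : Prop := ∀ (s : String), Dom_cal_weights s → Pre_cal_weights s → Spec_cal_weights s (cal_weights s)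
def Claim_raises_cal_weights : Prop := (∀ (s : String), Dom_cal_weights s → Raises_cal_weights s → ¬ Pre_cal_weights s) ∧ (Dom_cal_weights (pvRaiseWitness_cal_weights) ∧ Raises_cal_weights (pvRaiseWitness_cal_weights) ∧ cal_weights_alt (pvRaiseWitness_cal_weights) = pvRaiseWitnessOut_cal_weights)

-- ===== LEMMAS AND PROOFS =====

-- the stream of values A adds while scanning 'rest', current run char 'cur', run length k so far
def addSeq : List Char → Char → Int → List Int
  | [], _, _ => []
  | c :: rest, cur, k =>
    if c ≠ cur then pyWeight c :: addSeq rest c 1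
    else pyWeight cur * (k + 1) :: addSeq rest cur (k + 1)

-- B's tail of the run list after consuming 'rest' with open run (cur, k)
def rleCont : List Char → Char → Int → List (Char × Int)
  | [], cur, k => [(cur, k)]
  | c :: rest, cur, k =>
    if c = cur then rleCont rest cur (k + 1) else (cur, k) :: rleCont rest c 1

-- all Int values B adds, run by run
def flatW : List (Char × Int) → List Int
  | [] => []
  | (c, k) :: rs => (PySem.List.pyRange 1 (k + 1) 1).map (fun m => pyWeight c * m) ++ flatW rs

theorem foldl_add_map {α : Type} (f : α → Int) (l : List α) (w : PySem.Set Int) :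
    l.foldl (fun w m => PySem.Set.add w (f m)) w = (l.map f).foldl PySem.Set.add w := by
  induction l generalizing w with
  | nil => rfl
  | cons a l ih => simp [List.foldl, ih]

theorem altB_foldl (runs : List (Char × Int)) (w : PySem.Set Int) :
    runs.foldl (fun w ck =>
      (PySem.List.pyRange 1 (ck.2 + 1) 1).foldl (fun w m => PySem.Set.add w (pyWeight ck.1 * m)) w) w
    = (flatW runs).foldl PySem.Set.add w := by
  induction runs generalizing w with
  | nil => rfl
  | cons a rs ih =>
    obtain ⟨c, k⟩ := a
    simp only [List.foldl, flatW, List.foldl_append]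
    rw [foldl_add_map, ih]

theorem rle_foldl (rest : List Char) (pre : List (Char × Int)) (cur : Char) (k : Int) :
    rest.foldl rleStep (pre ++ [(cur, k)]) = pre ++ rleCont rest cur k := by
  induction rest generalizing pre cur k with
  | nil => simp [rleCont]
  | cons c r ih =>
    simp only [List.foldl, rleStep, rleCont]
    rw [List.getLast?_concat]
    by_cases h : cur = c
    · subst h
      simp only [BEq.rfl, List.dropLast_concat]
      exact ih pre cur (k + 1)
    · simp only [beq_iff_eq, if_neg h, if_neg (Ne.symm h)]
      simpa [List.append_assoc] using ih (pre ++ [(cur, k)]) c 1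

theorem flatW_cont (rest : List Char) (cur : Char) (k : Int) (hk : 1 ≤ k) :
    flatW (rleCont rest cur k)
      = (PySem.List.pyRange 1 (k + 1) 1).map (fun m => pyWeight cur * m) ++ addSeq rest cur k := by
  induction rest generalizing cur k with
  | nil => simp [rleCont, flatW, addSeq]
  | cons c r ih =>
    simp only [rleCont, addSeq]
    by_cases h : c = cur
    · subst h
      rw [if_pos rfl, if_neg (by simp), ih c (k + 1) (by omega)]
      rw [PySem.List.pyRange_one_succ_right (by omega : (1:Int) ≤ k + 1)]
      simp [List.map_append]
    · rw [if_neg h, if_pos h]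
      simp only [flatW, ih c 1 le_rfl]
      rw [PySem.List.pyRange_one_singleton]
      simp [mul_one]

-- A's loop folds the add-sequence of the remaining suffix
theorem calAloop_eq (cs : List Char) (i j : Nat) (w : PySem.Set Int) (hij : i ≤ j) :
    calAloop cs i j w
      = (addSeq (cs.drop j) (cs.getD i ' ') ((j : Int) - (i : Int))).foldl PySem.Set.add w := by
  by_cases h : j < cs.length
  · have hdrop : cs.drop j = cs.getD j ' ' :: cs.drop (j + 1) := by
      rw [List.getD_eq_getElem cs ' ' h]
      exact List.drop_eq_getElem_cons h
    rw [calAloop, dif_pos h, hdrop]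
    by_cases hne : cs.getD j ' ' = cs.getD i ' '
    · rw [if_neg (by simp only [bne_iff_ne, ne_eq, not_not]; exact hne),
          calAloop_eq cs i (j + 1) _ (by omega)]
      simp only [addSeq, if_neg (not_not_intro hne)]
      have hcast : (((j + 1 : Nat)) : Int) - (i : Int) = ((j : Int) - i) + 1 := by push_cast; ring
      rw [hcast]; rfl
    · rw [if_pos (by simp only [bne_iff_ne, ne_eq]; exact hne),
          calAloop_eq cs j (j + 1) _ (by omega)]
      simp only [addSeq, if_pos hne]
      have hcast : (((j + 1 : Nat)) : Int) - (j : Int) = 1 := by push_cast; ring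
      rw [hcast]; rfl
  · rw [calAloop, dif_neg h]
    rw [List.drop_eq_nil_of_le (by omega)]
    rfl
termination_by cs.length - j

theorem cal_weights_eq_of_cons (c : Char) (rest : List Char) (s : String) (hs : s.toList = c :: rest) :
    cal_weights s = cal_weights_alt s := by
  unfold cal_weights cal_weights_alt
  rw [hs]
  have hA := calAloop_eq (c :: rest) 0 1 (PySem.Set.add PySem.Set.empty (pyWeight ((c :: rest).getD 0 ' '))) (by omega)
  rw [hA]
  have hB : (c :: rest).foldl rleStep [] = rleCont rest c 1 := by
    have := rle_foldl rest ([] : List (Char × Int)) c 1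
    simpa [rleStep] using this
  simp only []
  rw [hB, altB_foldl, flatW_cont rest c 1 le_rfl]
  rw [PySem.List.pyRange_one_singleton]
  simp [mul_one, List.getD]

-- ===== VERDICT (by name: the statement is the Claim_ definition above) =====
theorem cal_weights_spec : Claim_equal_cal_weights := by
  intro s _ hpre
  unfold Spec_cal_weights
  cases hs : s.toList with
  | nil => exact absurd (by simpa using congrArg String.ofList hs) hpre
  | cons c rest => exact cal_weights_eq_of_cons c rest s hs

theorem cal_weights_raises : Claim_raises_cal_weights := by
  unfold Claim_raises_cal_weights
  exact ⟨fun s _ h => by simp [Pre_cal_weights, Raises_cal_weights] at *; exact h, by decide⟩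

-- witness self-check: the Pre_ witness is admissible, and the raises-witness indeed falls outside Pre_
theorem pvWitness_cal_weights_ok :
    (Dom_cal_weights pvWitness_cal_weights ∧ Pre_cal_weights pvWitness_cal_weights) ∧
      ¬ Pre_cal_weights pvRaiseWitness_cal_weights :=
  ⟨by decide, cal_weights_raises.1 pvRaiseWitness_cal_weights (by decide) rfl⟩
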